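-- pv_equiv track=rewrite | github.com/devjeetr/gazel | parsing.py | make_query_table
-- ===== SOURCE A (Python) =====
-- def make_hash(start, end):
--     return f"{start}:{end}"
--
-- def make_query_table(captures):
--     table = {}
--
--     for capture in captures:
--         indices, name = capture
--         hs = make_hash(*indices)
--         if hs in table:
--             previous = table[hs]
--             if previous.count(".") < name.count("."):
--                 table[hs] = name
--         else:
--             table[hs] = name
--
--     return table
-- ===== SOURCE B (Python) =====
-- def make_hash(start, end):
--     return f"{start}:{end}"
--
-- def make_query_table(captures):
--     groups = {}
--     for indices, name in captures:
--         groups.setdefault(make_hash(*indices), []).append(name)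
--     return {hs: max(names, key=lambda n: n.count(".")) for hs, names in groups.items()}
-- ===== Notes on version B (the rewrite author's own statement) =====
-- stated objective: alternative
-- what changed: Instead of keeping one running best name per hash and conditionally overwriting it, B first groups all names by hash in insertion order and then selects max(names, key=dot count) per group (max is first-wins on ties, matching A's strict-increase overwrite).
import Mathlib
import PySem

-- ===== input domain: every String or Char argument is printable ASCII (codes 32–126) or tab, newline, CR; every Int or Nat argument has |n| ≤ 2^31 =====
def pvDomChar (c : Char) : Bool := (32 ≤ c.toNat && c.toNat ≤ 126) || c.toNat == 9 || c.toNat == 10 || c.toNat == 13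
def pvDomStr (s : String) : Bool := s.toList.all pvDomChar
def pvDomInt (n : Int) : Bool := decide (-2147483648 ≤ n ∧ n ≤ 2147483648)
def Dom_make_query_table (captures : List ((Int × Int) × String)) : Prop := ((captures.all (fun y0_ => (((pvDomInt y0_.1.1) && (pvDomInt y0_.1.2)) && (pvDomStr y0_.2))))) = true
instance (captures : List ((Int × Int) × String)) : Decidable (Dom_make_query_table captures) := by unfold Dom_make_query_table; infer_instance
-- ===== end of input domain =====

-- B is an alternative decomposition: it first groups all names by index-hash (insertion order)
-- and then selects, per group, the first name with the maximal dot count (Python's max), instead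
-- of A's single running best per hash with conditional overwrite.

-- ===== PORT A =====
def make_hash (start fin : Int) : String :=
  PySem.Int.toStr start ++ ":" ++ PySem.Int.toStr fin

def make_query_table (captures : List ((Int × Int) × String)) : List (String × String) :=
  (captures.foldl
    (fun table capture =>
      let indices := capture.1
      let name := capture.2
      let hs := make_hash indices.1 indices.2
      match table.get? hs with
      | some previous =>
          if PySem.Str.count previous "." < PySem.Str.count name "." then
            table.insert hs name
          else table
      | none => table.insert hs name)
    PySem.Dict.empty).items

-- ===== PORT B =====
def make_hash_alt (start fin : Int) : String :=
  PySem.Int.toStr start ++ ":" ++ PySem.Int.toStr fin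

def make_query_table_alt (captures : List ((Int × Int) × String)) : List (String × String) :=
  let groups : PySem.Dict String (List String) :=
    captures.foldl
      (fun g capture =>
        g.modify (make_hash_alt capture.1.1 capture.1.2) [] (fun ns => ns ++ [capture.2]))
      PySem.Dict.empty
  -- max(names, key=…) always sees a nonempty group; .getD "" is its total form here
  groups.items.map (fun p =>
    (p.1, (PySem.List.max? p.2 (fun n => PySem.Str.count n ".")).getD ""))

-- ===== PRECONDITION & SPEC =====
def Spec_make_query_table (captures : List ((Int × Int) × String)) (out : List (String × String)) : Prop := out = make_query_table_alt captures
instance (captures : List ((Int × Int) × String)) (out : List (String × String)) : Decidable (Spec_make_query_table captures out) := by unfold Spec_make_query_table; infer_instance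

-- ===== CLAIM (what is proved, stated in full; the proofs are below) =====
def Claim_equal_make_query_table : Prop := ∀ (captures : List ((Int × Int) × String)), Dom_make_query_table captures → Spec_make_query_table captures (make_query_table captures)

-- ===== LEMMAS AND PROOFS =====

-- the selection B performs on each group
def pvSel (ns : List String) : String :=
  (PySem.List.max? ns (fun n => PySem.Str.count n ".")).getD ""

-- apply the selection to every value of the grouping dict
def pvMapVals (g : PySem.Dict String (List String)) : PySem.Dict String String :=
  PySem.Dict.mk (g.items.map (fun p => (p.1, pvSel p.2)))

lemma pv_keys_mapVals (g : PySem.Dict String (List String)) :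
    (pvMapVals g).keys = g.keys := by
  simp [pvMapVals, PySem.Dict.keys, List.map_map, Function.comp]

lemma pv_contains_mapVals (g : PySem.Dict String (List String)) (k : String) :
    (pvMapVals g).contains k = g.contains k := by
  simp [pvMapVals, PySem.Dict.contains, List.any_map, Function.comp_def]

lemma pv_get?_mapVals (g : PySem.Dict String (List String)) (k : String) :
    (pvMapVals g).get? k = (g.get? k).map pvSel := by
  simp only [pvMapVals, PySem.Dict.get?, List.find?_map, Function.comp_def]
  cases h : List.find? (fun p => p.1 == k) g.items <;> simp [h]

lemma pv_mapVals_insert (g : PySem.Dict String (List String)) (k : String) (v : List String) :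
    pvMapVals (g.insert k v) = (pvMapVals g).insert k (pvSel v) := by
  apply PySem.Dict.ext
  by_cases hc : g.contains k = true
  · have hc' : (pvMapVals g).contains k = true := by rw [pv_contains_mapVals]; exact hc
    show ((g.insert k v).items.map _) = _
    rw [PySem.Dict.items_insert_of_contains _ _ hc, PySem.Dict.items_insert_of_contains _ _ hc']
    show _ = List.map _ (g.items.map _)
    rw [List.map_map, List.map_map]
    apply List.map_congr_left
    intro p _
    by_cases h : p.1 = k <;> simp [Function.comp, h]
  · have hcf : g.contains k = false := eq_false_of_ne_true hc
    have hcf' : (pvMapVals g).contains k = false := by rw [pv_contains_mapVals]; exact hcf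
    show ((g.insert k v).items.map _) = _
    rw [PySem.Dict.items_insert_of_not_contains _ _ hcf, PySem.Dict.items_insert_of_not_contains _ _ hcf']
    simp [pvMapVals]

lemma pv_sel_append (ns : List String) (n : String) (h : ns ≠ []) :
    pvSel (ns ++ [n])
      = if PySem.Str.count (pvSel ns) "." < PySem.Str.count n "." then n else pvSel ns := by
  have hne : PySem.List.max? ns (fun m => PySem.Str.count m ".") ≠ none := by
    intro he
    exact h ((PySem.List.max?_eq_none_iff ns _).mp he)
  obtain ⟨m, hm⟩ := Option.ne_none_iff_exists'.mp hne
  unfold pvSel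
  unfold PySem.List.max? at hm ⊢
  rw [List.foldl_append, hm]
  by_cases hc : PySem.Chars.count m.toList ['.'] < PySem.Chars.count n.toList ['.'] <;> simp [hc]

lemma pv_insert_self (d : PySem.Dict String String) (k : String) (v : String)
    (hnd : d.keys.Nodup) (h : d.get? k = some v) : d.insert k v = d := by
  apply PySem.Dict.ext
  have hc : d.contains k = true := by
    rw [PySem.Dict.contains_eq_isSome_get?, h]; rfl
  rw [PySem.Dict.items_insert_of_contains _ _ hc]
  have hcong : ∀ p ∈ d.items, (if (p.1 == k) = true then (k, v) else p) = p := by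
    intro p hp
    obtain ⟨p1, p2⟩ := p
    by_cases hpk : p1 = k
    · subst hpk
      have hget := PySem.Dict.get?_of_mem_items d hp hnd
      rw [h] at hget
      have hv : v = p2 := by injection hget
      simp [hv]
    · simp [hpk]
  rw [List.map_congr_left hcong, List.map_id']

lemma pv_main (l : List ((Int × Int) × String)) :
    ∀ (g : PySem.Dict String (List String)),
      g.keys.Nodup → (∀ p ∈ g.items, p.2 ≠ []) →
      l.foldl
        (fun table capture =>
          let indices := capture.1
          let name := capture.2
          let hs := make_hash indices.1 indices.2
          match table.get? hs with
          | some previous =>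
              if PySem.Str.count previous "." < PySem.Str.count name "." then
                table.insert hs name
              else table
          | none => table.insert hs name)
        (pvMapVals g)
      = pvMapVals (l.foldl
          (fun g capture =>
            g.modify (make_hash_alt capture.1.1 capture.1.2) [] (fun ns => ns ++ [capture.2]))
          g) := by
  induction l with
  | nil => intro g _ _; rfl
  | cons c l ih =>
    intro g hnd hne
    simp only [List.foldl_cons]
    have hhash : make_hash_alt c.1.1 c.1.2 = make_hash c.1.1 c.1.2 := rfl
    rw [hhash]
    set hs := make_hash c.1.1 c.1.2 with hhs
    cases hg : g.get? hs with
    | none =>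
      have hga : (pvMapVals g).get? hs = none := by rw [pv_get?_mapVals, hg]; rfl
      have hmod : g.modify hs [] (fun ns => ns ++ [c.2]) = g.insert hs [c.2] := by
        unfold PySem.Dict.modify
        rw [PySem.Dict.getD_of_get?_eq_none _ _ hg]
        rfl
      simp only [hga, hmod]
      have hacc : (pvMapVals g).insert hs c.2 = pvMapVals (g.insert hs [c.2]) := by
        rw [pv_mapVals_insert]
        rfl
      rw [hacc]
      exact ih (g.insert hs [c.2]) (PySem.Dict.nodup_keys_insert _ _ _ hnd)
        (by
          intro p hp
          rcases (PySem.Dict.mem_items_insert g hs [c.2] p).mp hp with h1 | h2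
          · subst h1; simp
          · exact hne p h2.1)
    | some old =>
      have hold : old ≠ [] := hne (hs, old) (PySem.Dict.mem_items_of_get?_eq_some g hg)
      have hga : (pvMapVals g).get? hs = some (pvSel old) := by rw [pv_get?_mapVals, hg]; rfl
      have hmod : g.modify hs [] (fun ns => ns ++ [c.2]) = g.insert hs (old ++ [c.2]) := by
        unfold PySem.Dict.modify
        rw [PySem.Dict.getD_of_get?_eq_some _ _ hg]
      have hg' : (∀ p ∈ (g.insert hs (old ++ [c.2])).items, p.2 ≠ []) := by
        intro p hp
        rcases (PySem.Dict.mem_items_insert g hs (old ++ [c.2]) p).mp hp with h1 | h2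
        · subst h1; simp
        · exact hne p h2.1
      have hnd' := PySem.Dict.nodup_keys_insert g hs (old ++ [c.2]) hnd
      simp only [hga, hmod]
      by_cases hcond : PySem.Str.count (pvSel old) "." < PySem.Str.count c.2 "."
      · rw [if_pos hcond]
        have hacc : (pvMapVals g).insert hs c.2 = pvMapVals (g.insert hs (old ++ [c.2])) := by
          rw [pv_mapVals_insert, pv_sel_append old c.2 hold, if_pos hcond]
        rw [hacc]
        exact ih (g.insert hs (old ++ [c.2])) hnd' hg'
      · rw [if_neg hcond]
        have hacc : pvMapVals g = pvMapVals (g.insert hs (old ++ [c.2])) := by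
          rw [pv_mapVals_insert, pv_sel_append old c.2 hold, if_neg hcond]
          exact (pv_insert_self (pvMapVals g) hs (pvSel old)
            (by rw [pv_keys_mapVals]; exact hnd) hga).symm
        rw [hacc]
        exact ih (g.insert hs (old ++ [c.2])) hnd' hg'

-- ===== VERDICT (by name: the statement is the Claim_ definition above) =====
theorem make_query_table_spec : Claim_equal_make_query_table := by
  intro captures _
  show make_query_table captures = make_query_table_alt captures
  have h := pv_main captures PySem.Dict.empty PySem.Dict.nodup_keys_empty
    (by intro p hp; cases hp)
  exact congrArg PySem.Dict.items h
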